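-- pv_equiv track=rewrite | github.com/Architeuthis-Flux/Temporal-Replay-26-Badge | firmware/data/apps/synth/main.py | vol_mask
-- ===== SOURCE A (Python) =====
-- def vol_mask(vol):
--     width = vol * 7 // 60 + 1
--     if width > 8:
--         width = 8
--     left = (8 - width) // 2
--     mask = 0
--     for i in range(width):
--         mask |= 1 << (7 - left - i)
--     return mask
-- ===== SOURCE B (Python) =====
-- # Width only takes values 0..8 after clamping, and the mask depends only on the
-- # width, so look the whole mask up in a precomputed mask table.
-- _MASKS = (0, 16, 24, 56, 60, 124, 126, 254, 255)
--
-- def vol_mask(vol):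
--     width = vol * 7 // 60 + 1
--     return _MASKS[min(max(width, 0), 8)]
-- ===== Notes on version B (the rewrite author's own statement) =====
-- stated objective: simpler
-- what changed: Replaced the left-offset computation and bit-accumulating loop with a single lookup into a precomputed mask table indexed by the clamped width.
import Mathlib
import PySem

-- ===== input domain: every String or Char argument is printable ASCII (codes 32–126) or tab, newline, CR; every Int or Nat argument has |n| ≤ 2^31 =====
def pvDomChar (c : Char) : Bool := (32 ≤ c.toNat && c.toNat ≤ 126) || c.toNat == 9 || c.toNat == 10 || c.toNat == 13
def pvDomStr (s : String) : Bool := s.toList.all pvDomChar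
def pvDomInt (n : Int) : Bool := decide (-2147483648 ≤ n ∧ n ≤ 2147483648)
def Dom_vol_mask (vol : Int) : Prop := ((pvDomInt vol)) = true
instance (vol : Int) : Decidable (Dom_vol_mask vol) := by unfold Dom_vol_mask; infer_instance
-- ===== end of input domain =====

-- B replaces the left-offset computation and A's bit-accumulating loop with a lookup
-- in a precomputed precomputed mask table indexed by the clamped width (objective: simpler).

-- ===== PORT A =====
-- The loop's shift exponent 7-left-i is always ≥ 0 when the loop body runs, so `.toNat` is exact there.
def vol_mask (vol : Int) : Int :=
  let width0 := PySem.Int.floordiv (vol * 7) 60 + 1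
  let width := if width0 > 8 then 8 else width0
  let left := PySem.Int.floordiv (8 - width) 2
  (PySem.List.pyRange 0 width 1).foldl
    (fun mask i => PySem.Int.bor mask ((1 : Int) <<< (7 - left - i).toNat)) 0

-- ===== PORT B =====
def volMaskTable : List Int := [0, 16, 24, 56, 60, 124, 126, 254, 255]

-- The table index min(max(width,0),8) always lies in [0, 8], so pyGet? is some and `.getD 0` is exact.
def vol_mask_alt (vol : Int) : Int :=
  let width := PySem.Int.floordiv (vol * 7) 60 + 1
  (PySem.List.pyGet? volMaskTable (min (max width 0) 8)).getD 0

-- ===== PRECONDITION & SPEC =====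
def Spec_vol_mask (vol : Int) (out : Int) : Prop := out = vol_mask_alt vol
instance (vol : Int) (out : Int) : Decidable (Spec_vol_mask vol out) := by unfold Spec_vol_mask; infer_instance

-- ===== CLAIM (what is proved, stated in full; the proofs are below) =====
def Claim_equal_vol_mask : Prop := ∀ (vol : Int), Dom_vol_mask vol → Spec_vol_mask vol (vol_mask vol)

-- ===== LEMMAS AND PROOFS =====

-- ===== VERDICT (by name: the statement is the Claim_ definition above) =====
theorem vol_mask_spec : Claim_equal_vol_mask := by
  intro vol _
  unfold Spec_vol_mask
  simp only [vol_mask, vol_mask_alt]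
  generalize PySem.Int.floordiv (vol * 7) 60 + 1 = w
  by_cases h8 : w > 8
  · have hi : min (max w 0) 8 = 8 := by omega
    simp only [if_pos h8, hi]
    decide
  · simp only [if_neg h8]
    by_cases h0 : w ≤ 0
    · have hi : min (max w 0) 8 = 0 := by omega
      have hr : PySem.List.pyRange 0 w 1 = [] := by
        simp [PySem.List.pyRange]; omega
      simp [hi, hr, volMaskTable, PySem.List.pyGet?, PySem.List.pyIdx?]
    · have h1 : 1 ≤ w := by omega
      have h2 : w ≤ 8 := by omega
      have hi : min (max w 0) 8 = w := by omega
      rw [hi]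
      interval_cases w <;> decide
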